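-- pv_equiv track=rewrite | github.com/GageErwin/AdventOfCode24 | Day2/main.py | part2
-- ===== SOURCE A (Python) =====
-- def check_structure(data: list[int]):
--     diff = [a - b for a, b in zip(data, data[1:])]
--     is_increasing_or_decreasing = all(i > 0 for i in diff) or all(i < 0 for i in diff)
--     is_inbounds = all(0 < abs(i) <= 3 for i in diff)
--     if is_increasing_or_decreasing and is_inbounds:
--         return True
--     else:
--         return False
--
-- def part2(info: list[list[int]]):
--     result = 0
--     for line in info:
--         valid = check_structure(line)
--         if valid:
--             result += 1
--         else:
--             for i in range(len(line)):
--                 levels = line[:i] + line[i + 1 :]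
--                 valid = check_structure(levels)
--                 if valid:
--                     result += 1
--                     break
--
--     return result
-- ===== SOURCE B (Python) =====
-- # Single-pass "dampener": per line, find the first violating adjacent pair and
-- # try skipping only one of its two elements (O(n) per line vs A's O(n^2)).
--
-- def _ok_inc(a, b):
--     return 0 < a - b <= 3
--
-- def _ok_dec(a, b):
--     return -3 <= a - b < 0
--
-- def _chain_from(l, s, ok):
--     return all(ok(l[i], l[i + 1]) for i in range(s, len(l) - 1))
--
-- def _damp(l, ok):
--     for k in range(len(l) - 1):
--         if not ok(l[k], l[k + 1]):
--             # first violation at pair (k, k+1): only skipping l[k] or l[k+1] can help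
--             left = (k == 0 or ok(l[k - 1], l[k + 1])) and _chain_from(l, k + 1, ok)
--             right = (k + 2 >= len(l) or ok(l[k], l[k + 2])) and _chain_from(l, k + 2, ok)
--             return left or right
--     return True
--
-- def part2(info):
--     result = 0
--     for line in info:
--         if _damp(line, _ok_inc) or _damp(line, _ok_dec):
--             result += 1
--     return result
-- ===== Notes on version B (the rewrite author's own statement) =====
-- stated objective: faster
-- what changed: Per line, instead of re-checking every one-element-removed copy (O(n^2) per line), B scans once per direction, finds the first violating adjacent pair and checks only the two candidate removals by stitching the already-validated prefix to the suffix (O(n) per line).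
import Mathlib
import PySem

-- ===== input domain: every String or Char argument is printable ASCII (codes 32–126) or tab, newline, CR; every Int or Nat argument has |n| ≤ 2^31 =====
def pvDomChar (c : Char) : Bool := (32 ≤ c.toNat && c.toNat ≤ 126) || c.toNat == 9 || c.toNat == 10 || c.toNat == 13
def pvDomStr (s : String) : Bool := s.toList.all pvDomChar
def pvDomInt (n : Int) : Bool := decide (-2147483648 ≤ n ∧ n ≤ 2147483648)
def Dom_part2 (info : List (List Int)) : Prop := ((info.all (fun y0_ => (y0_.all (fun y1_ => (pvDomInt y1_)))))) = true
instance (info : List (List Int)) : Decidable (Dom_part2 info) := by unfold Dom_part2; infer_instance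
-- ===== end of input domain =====

-- B replaces A's per-line brute force over all one-element removals by a single
-- scan per direction that tries only the two removals at the first violating pair (faster, asymptotic).


-- ===== PORT A =====
-- diff = [a - b for a, b in zip(data, data[1:])]
def csDiff (data : List Int) : List Int :=
  (data.zip (PySem.List.slice data (some 1) none)).map (fun p => p.1 - p.2)

def checkStructure (data : List Int) : Bool :=
  let diff := csDiff data
  let isIncreasingOrDecreasing := diff.all (fun i => decide (i > 0)) || diff.all (fun i => decide (i < 0))
  let isInbounds := diff.all (fun i => decide (0 < |i| ∧ |i| ≤ 3))
  if isIncreasingOrDecreasing && isInbounds then true else false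

-- inner 'for i in range(len(line)): … break' — adds 1 at the first i whose removal validates
def part2Go (line : List Int) : List Int → Int
  | [] => 0
  | i :: rest =>
    if checkStructure (PySem.List.slice line none (some i) ++ PySem.List.slice line (some (i + 1)) none)
    then 1 else part2Go line rest

def part2 (info : List (List Int)) : Int :=
  info.foldl (fun result line =>
    if checkStructure line then result + 1
    else result + part2Go line (PySem.List.pyRange 0 (line.length : Int) 1)) 0

-- ===== PORT B =====
def okInc (a b : Int) : Bool := decide (0 < a - b ∧ a - b ≤ 3)
def okDec (a b : Int) : Bool := decide (-3 ≤ a - b ∧ a - b < 0)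

-- all(ok(l[i], l[i+1]) …): the plain chain check
def chainB (ok : Int → Int → Bool) : List Int → Bool
  | a :: b :: t => ok a b && chainB ok (b :: t)
  | _ => true

-- the scan of B's _damp loop: p is the element before a (none at the start);
-- at the first violating pair (a, b) only removing a or removing b can help
def dampGo (ok : Int → Int → Bool) (p : Option Int) (a : Int) : List Int → Bool
  | [] => true
  | b :: t =>
    if ok a b then dampGo ok (some a) b t
    else
      ((match p with | none => true | some q => ok q b) && chainB ok (b :: t))
      || ((match t with | [] => true | c :: _ => ok a c) && chainB ok t)

def damp (ok : Int → Int → Bool) : List Int → Bool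
  | [] => true
  | a :: t => dampGo ok none a t

def part2_alt (info : List (List Int)) : Int :=
  info.foldl (fun result line =>
    if damp okInc line || damp okDec line then result + 1 else result) 0

-- ===== PRECONDITION & SPEC =====
def Spec_part2 (info : List (List Int)) (out : Int) : Prop := out = part2_alt info
instance (info : List (List Int)) (out : Int) : Decidable (Spec_part2 info out) := by unfold Spec_part2; infer_instance

-- ===== CLAIM (what is proved, stated in full; the proofs are below) =====
def Claim_equal_part2 : Prop := ∀ (info : List (List Int)), Dom_part2 info → Spec_part2 info (part2 info)

-- ===== LEMMAS AND PROOFS =====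

theorem csDiff_cons (a b : Int) (t : List Int) :
    csDiff (a :: b :: t) = (a - b) :: csDiff (b :: t) := by
  simp [csDiff, PySem.List.slice_from_one]

theorem csDiff_single (a : Int) : csDiff [a] = [] := by
  simp [csDiff, PySem.List.slice_from_one]

theorem csDiff_nil : csDiff [] = [] := by
  simp [csDiff]

theorem chainB_inc_iff (l : List Int) :
    chainB okInc l = true ↔ ∀ d ∈ csDiff l, 0 < d ∧ d ≤ 3 := by
  induction l with
  | nil => simp [chainB, csDiff_nil]
  | cons a t ih =>
    cases t with
    | nil => simp [chainB, csDiff_single]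
    | cons b t' =>
      rw [csDiff_cons]
      simp only [chainB, Bool.and_eq_true, ih, List.mem_cons, forall_eq_or_imp, okInc,
        decide_eq_true_eq]

theorem chainB_dec_iff (l : List Int) :
    chainB okDec l = true ↔ ∀ d ∈ csDiff l, -3 ≤ d ∧ d < 0 := by
  induction l with
  | nil => simp [chainB, csDiff_nil]
  | cons a t ih =>
    cases t with
    | nil => simp [chainB, csDiff_single]
    | cons b t' =>
      rw [csDiff_cons]
      simp only [chainB, Bool.and_eq_true, ih, List.mem_cons, forall_eq_or_imp, okDec,
        decide_eq_true_eq]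

theorem checkStructure_iff (l : List Int) :
    checkStructure l = true ↔ (chainB okInc l = true ∨ chainB okDec l = true) := by
  have hcs : checkStructure l = true ↔
      ((∀ d ∈ csDiff l, 0 < d) ∨ (∀ d ∈ csDiff l, d < 0)) ∧
        (∀ d ∈ csDiff l, 0 < |d| ∧ |d| ≤ 3) := by
    simp [checkStructure]
  rw [hcs, chainB_inc_iff, chainB_dec_iff]
  constructor
  · rintro ⟨pos | neg, bnd⟩
    · left; intro d hd
      have h1 := pos d hd; have h2 := bnd d hd
      rw [abs_of_pos h1] at h2; omega
    · right; intro d hd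
      have h1 := neg d hd; have h2 := bnd d hd
      rw [abs_of_neg h1] at h2; omega
  · rintro (h | h)
    · refine ⟨Or.inl fun d hd => (h d hd).1, fun d hd => ?_⟩
      have := h d hd; rw [abs_of_pos this.1]; omega
    · refine ⟨Or.inr fun d hd => (h d hd).2, fun d hd => ?_⟩
      have := h d hd; rw [abs_of_neg this.2]; omega

theorem chainB_of_cons (ok : Int → Int → Bool) (q : Int) (rest : List Int)
    (h : chainB ok (q :: rest) = true) : chainB ok rest = true := by
  cases rest with
  | nil => simp [chainB]
  | cons r t => exact (Bool.and_eq_true .. ▸ h).2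

theorem chainB_cons_of_cons (ok : Int → Int → Bool) (q a : Int) (rest : List Int)
    (hq : ok q a = true) (h : chainB ok (a :: rest) = true) :
    chainB ok (q :: a :: rest) = true := by
  simp [chainB, hq, h]

theorem chainB_opt_cons (ok : Int → Int → Bool) (p : Option Int) (a : Int) (rest : List Int)
    (hp : ∀ q, p = some q → ok q a = true) (h : chainB ok (a :: rest) = true) :
    chainB ok (p.toList ++ a :: rest) = true := by
  cases p with
  | none => exact h
  | some q => exact chainB_cons_of_cons ok q a rest (hp q rfl) h

theorem chainB_of_opt_cons (ok : Int → Int → Bool) (p : Option Int) (rest : List Int)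
    (h : chainB ok (p.toList ++ rest) = true) : chainB ok rest = true := by
  cases p with
  | none => exact h
  | some q => exact chainB_of_cons ok q rest h

theorem dampGo_iff (ok : Int → Int → Bool) :
    ∀ (t : List Int) (a : Int) (p : Option Int),
      (∀ q, p = some q → ok q a = true) →
      (dampGo ok p a t = true ↔
        ∃ i : Nat, chainB ok (p.toList ++ (a :: t).eraseIdx i) = true) := by
  intro t
  induction t with
  | nil =>
    intro a p hp
    simp only [dampGo, true_iff]
    refine ⟨1, ?_⟩
    simp only [List.eraseIdx]
    exact chainB_opt_cons ok p a [] hp (by simp [chainB])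
  | cons b t' ih =>
    intro a p hp
    by_cases h : ok a b = true
    · rw [show dampGo ok p a (b :: t') = dampGo ok (some a) b t' by simp [dampGo, h]]
      rw [ih b (some a) (by rintro q ⟨rfl⟩; exact h)]
      constructor
      · rintro ⟨i, hi⟩
        refine ⟨i + 1, ?_⟩
        simp only [List.eraseIdx_cons_succ]
        exact chainB_opt_cons ok p a _ hp hi
      · rintro ⟨i, hi⟩
        cases i with
        | zero =>
          refine ⟨(b :: t').length, ?_⟩
          rw [List.eraseIdx_of_length_le (le_refl _)]
          simp only [List.eraseIdx_cons_zero] at hi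
          exact chainB_cons_of_cons ok a b t' h (chainB_of_opt_cons ok p _ hi)
        | succ j =>
          refine ⟨j, ?_⟩
          simp only [List.eraseIdx_cons_succ] at hi
          exact chainB_of_opt_cons ok p _ hi
    · have hd : dampGo ok p a (b :: t') =
          (chainB ok (p.toList ++ b :: t') || chainB ok (a :: t')) := by
        cases p <;> cases t' <;> simp [dampGo, h, chainB]
      rw [hd]
      simp only [Bool.or_eq_true]
      constructor
      · rintro (hl | hr)
        · exact ⟨0, by simpa only [List.eraseIdx_cons_zero] using hl⟩
        · refine ⟨1, ?_⟩
          simp only [List.eraseIdx_cons_succ, List.eraseIdx_cons_zero]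
          exact chainB_opt_cons ok p a t' hp hr
      · rintro ⟨i, hi⟩
        cases i with
        | zero => exact Or.inl (by simpa only [List.eraseIdx_cons_zero] using hi)
        | succ j =>
          cases j with
          | zero =>
            right
            simp only [List.eraseIdx_cons_succ, List.eraseIdx_cons_zero] at hi
            exact chainB_of_opt_cons ok p _ hi
          | succ k =>
            exfalso
            simp only [List.eraseIdx_cons_succ] at hi
            have h2 : chainB ok (a :: b :: (t'.eraseIdx k)) = true :=
              chainB_of_opt_cons ok p _ hi
            exact h (Bool.and_eq_true .. ▸ h2).1

theorem damp_iff (ok : Int → Int → Bool) (l : List Int) :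
    damp ok l = true ↔ ∃ i : Nat, chainB ok (l.eraseIdx i) = true := by
  cases l with
  | nil => simp [damp, chainB]
  | cons a t =>
    have := dampGo_iff ok t a none (by simp)
    simpa [damp] using this

theorem exists_erase_iff (C : List Int → Prop) (l : List Int) :
    (∃ i : Nat, C (l.eraseIdx i)) ↔ C l ∨ ∃ k : Nat, k < l.length ∧ C (l.eraseIdx k) := by
  constructor
  · rintro ⟨i, hi⟩
    by_cases h : i < l.length
    · exact Or.inr ⟨i, h, hi⟩
    · left; rwa [List.eraseIdx_of_length_le (by omega)] at hi
  · rintro (h | ⟨k, _, hk⟩)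
    · exact ⟨l.length, by rwa [List.eraseIdx_of_length_le (le_refl _)]⟩
    · exact ⟨k, hk⟩

theorem part2Go_eq (line : List Int) (is : List Int) :
    part2Go line is =
      if is.any (fun i => checkStructure (PySem.List.slice line none (some i) ++ PySem.List.slice line (some (i + 1)) none))
      then 1 else 0 := by
  induction is with
  | nil => simp [part2Go]
  | cons i rest ih => by_cases h : checkStructure (PySem.List.slice line none (some i) ++ PySem.List.slice line (some (i + 1)) none) = true <;>
      simp [part2Go, h, ih]

theorem sliceSplit_eq_eraseIdx (line : List Int) (i : Int) (h0 : 0 ≤ i) :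
    PySem.List.slice line none (some i) ++ PySem.List.slice line (some (i + 1)) none
      = line.eraseIdx i.toNat := by
  have h1 : (i + 1).toNat = i.toNat + 1 := by omega
  rw [PySem.List.slice_to _ h0, PySem.List.slice_from _ (show (0:Int) ≤ i + 1 by omega),
    List.eraseIdx_eq_take_drop_succ, h1]

theorem lineA_iff (line : List Int) :
    (checkStructure line = true ∨ part2Go line (PySem.List.pyRange 0 (line.length : Int) 1) = 1) ↔
      (damp okInc line = true ∨ damp okDec line = true) := by
  have hany :
      part2Go line (PySem.List.pyRange 0 (line.length : Int) 1) = 1 ↔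
        ∃ k : Nat, k < line.length ∧ checkStructure (line.eraseIdx k) = true := by
    rw [part2Go_eq]
    have hone : ∀ b : Bool, (if b then (1 : Int) else 0) = 1 ↔ b = true := by
      intro b; cases b <;> simp
    rw [hone, List.any_eq_true]
    constructor
    · rintro ⟨i, hmem, hck⟩
      have hm := (PySem.List.mem_pyRange_one).mp hmem
      refine ⟨i.toNat, by omega, ?_⟩
      rwa [sliceSplit_eq_eraseIdx line i hm.1] at hck
    · rintro ⟨k, hk, hck⟩
      refine ⟨(k : Int), (PySem.List.mem_pyRange_one).mpr ⟨by omega, by exact_mod_cast hk⟩, ?_⟩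
      rw [sliceSplit_eq_eraseIdx line k (by omega)]
      simpa using hck
  rw [hany, damp_iff, damp_iff,
    exists_erase_iff (fun l' => chainB okInc l' = true) line,
    exists_erase_iff (fun l' => chainB okDec l' = true) line]
  simp only [checkStructure_iff]
  constructor
  · rintro (h | ⟨k, hk, h | h⟩)
    · tauto
    · exact Or.inl (Or.inr ⟨k, hk, h⟩)
    · exact Or.inr (Or.inr ⟨k, hk, h⟩)
  · rintro ((h | ⟨k, hk, h⟩) | (h | ⟨k, hk, h⟩))
    · tauto
    · exact Or.inr ⟨k, hk, Or.inl h⟩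
    · tauto
    · exact Or.inr ⟨k, hk, Or.inr h⟩

-- ===== VERDICT (by name: the statement is the Claim_ definition above) =====
theorem part2_go_val (line : List Int) (is : List Int) :
    part2Go line is = 0 ∨ part2Go line is = 1 := by
  rw [part2Go_eq]
  split <;> simp

theorem part2_spec : Claim_equal_part2 := by
  intro info _
  unfold Spec_part2 part2 part2_alt
  congr 1
  funext result line
  by_cases hB : (damp okInc line || damp okDec line) = true
  · have hA := (lineA_iff line).mpr (by simpa [Bool.or_eq_true] using hB)
    rcases hA with h | h
    · simp [h, hB]
    · rcases part2_go_val line (PySem.List.pyRange 0 (line.length : Int) 1) with h0 | _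
      · omega
      · by_cases hc : checkStructure line = true
        · simp [hc, hB]
        · simp [hc, hB, h]
  · have hA : ¬(checkStructure line = true ∨
        part2Go line (PySem.List.pyRange 0 (line.length : Int) 1) = 1) := by
      intro hcontra
      exact hB (by simpa [Bool.or_eq_true] using (lineA_iff line).mp hcontra)
    rw [not_or] at hA
    rcases part2_go_val line (PySem.List.pyRange 0 (line.length : Int) 1) with h0 | h1
    · simp [hA.1, hB, h0]
    · exact absurd h1 hA.2
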